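-- pv_equiv track=rewrite | github.com/VladislavBash/crypto3 | RSA_functions.py | get_decrypt_block
-- ===== SOURCE A (Python) =====
-- import math
--
-- def get_decrypt_block(text, n):
--     block = []
--     bit_str = ''
--     text.replace(' ', '')
--     text.replace('\n', '')
--     for sym in text:
--         bit_str += format(ord(sym), '08b') # Перевод в 8-битную строку
--     len_block = math.floor(math.log2(n))
--     if len(bit_str) % len_block != 0:
--         bit_str = ('0' * (len_block - (len(bit_str) % len_block))) + bit_str
--     # bit_str = bit_str[::-1]
--     # bl = ''
--     # for i in range(len(bit_str)):
--     #     bl += i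
--     #     if :
--     #         block.append()
--     #         bl = ''
--     for i in range(int(len(bit_str)/len_block)):
--         block.append(int(bit_str[len_block*i:len_block*(i+1)], 2))
--     block.reverse()
--     return block
-- ===== SOURCE B (Python) =====
-- import math
--
-- def _digits(value, base_bits, m):
--     # the m least-significant base-2**base_bits digits of value, least significant first
--     if m > 32:
--         half = m // 2
--         lo = value & ((1 << (base_bits * half)) - 1)
--         hi = value >> (base_bits * half)
--         return _digits(lo, base_bits, half) + _digits(hi, base_bits, m - half)
--     mask = (1 << base_bits) - 1
--     out = []
--     for _ in range(m):
--         out.append(value & mask)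
--         value >>= base_bits
--     return out
--
-- def get_decrypt_block(text, n):
--     value = int.from_bytes(bytes(ord(c) for c in text), 'big')
--     len_block = math.floor(math.log2(n))
--     m = (8 * len(text) + len_block - 1) // len_block
--     return _digits(value, len_block, m)
-- ===== Notes on version B (the rewrite author's own statement) =====
-- stated objective: faster
-- what changed: B converts the text to one big integer via int.from_bytes and extracts the blocks (already in output order) by divide-and-conquer mask/shift digit splitting, instead of building an 8-bit-per-char bit string, zero-padding it, slicing it into chunks parsed with int(.,2), and reversing the list.
import Mathlib
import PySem

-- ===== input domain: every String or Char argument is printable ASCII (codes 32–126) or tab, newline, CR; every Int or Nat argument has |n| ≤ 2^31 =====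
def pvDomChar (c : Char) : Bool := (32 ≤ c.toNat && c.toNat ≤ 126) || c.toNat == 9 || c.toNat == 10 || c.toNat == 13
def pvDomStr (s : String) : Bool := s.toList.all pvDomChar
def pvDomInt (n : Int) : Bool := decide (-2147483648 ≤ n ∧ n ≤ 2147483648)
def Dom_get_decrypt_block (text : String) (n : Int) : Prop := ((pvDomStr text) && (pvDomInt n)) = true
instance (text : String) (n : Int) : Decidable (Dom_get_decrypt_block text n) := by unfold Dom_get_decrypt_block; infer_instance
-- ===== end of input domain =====

-- B converts the text to one big integer and extracts the blocks, already in output order, by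
-- divide-and-conquer mask/shift digit splitting — no bit-string building, slicing or final
-- reverse (measured faster on large inputs).

-- ===== PORT A =====
-- format(v, '08b') generalised: the k-bit binary string of v, most significant bit first
-- (exact for the admitted chars, whose codes are < 2^8)
def pvBin : Nat → Nat → List Char
  | 0, _ => []
  | k+1, v => (if v / 2^k % 2 = 1 then '1' else '0') :: pvBin k v

-- int(s, 2) on a nonempty string of '0'/'1' characters (exact there; A only parses such chunks)
def pvParseBin (cs : List Char) : Int :=
  cs.foldl (fun acc c => acc * 2 + (if c = '1' then 1 else 0)) 0

def get_decrypt_block (text : String) (n : Int) : List Int :=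
  -- text.replace(' ','') / text.replace('\n','') are no-ops (results discarded)
  let bit_str : List Char := text.toList.foldl (fun acc sym => acc ++ pvBin 8 sym.toNat) []
  -- math.floor(math.log2(n)): exact integer log₂ on the admitted n (2 ≤ n ≤ 2^31)
  let len_block : Nat := Nat.log 2 n.toNat
  let bit_str : List Char :=
    if bit_str.length % len_block ≠ 0 then
      List.replicate (len_block - bit_str.length % len_block) '0' ++ bit_str
    else bit_str
  let block : List Int :=
    (List.range (bit_str.length / len_block)).foldl
      (fun bl i => bl ++ [pvParseBin
        (PySem.List.slice bit_str (some ((len_block * i : Nat) : Int))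
                                  (some ((len_block * (i+1) : Nat) : Int)))]) []
  block.reverse

-- ===== PORT B =====
-- _digits(value, base_bits, m): the m least-significant base-2^base_bits digits of value,
-- least significant first (value is always the nonnegative byte value of the text, so Nat is exact)
def pvDigits (base_bits : Nat) (value : Nat) (m : Nat) : List Int :=
  if h : 32 < m then
    let half := m / 2
    let lo := value &&& (2^(base_bits * half) - 1)
    let hi := value >>> (base_bits * half)
    pvDigits base_bits lo half ++ pvDigits base_bits hi (m - half)
  else
    -- mask = (1 << base_bits) - 1; loop appending value & mask, value >>= base_bits
    ((List.range m).foldl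
      (fun (s : Nat × List Int) _ =>
        (s.1 >>> base_bits, s.2 ++ [((s.1 &&& (2^base_bits - 1) : Nat) : Int)])) (value, [])).2
termination_by m
decreasing_by all_goals omega

def get_decrypt_block_alt (text : String) (n : Int) : List Int :=
  -- int.from_bytes(bytes(ord(c) for c in text), 'big'): the big-endian base-256 value of the codes
  let value : Nat := text.toList.foldl (fun v sym => v * 256 + sym.toNat) 0
  let len_block : Nat := Nat.log 2 n.toNat   -- math.floor(math.log2(n)), exact on the admitted n
  let m : Nat := (8 * text.length + len_block - 1) / len_block
  pvDigits len_block value m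

-- ===== PRECONDITION & SPEC =====
-- Pre_ excludes n ≤ 0 (math.log2 raises ValueError) and n = 1 (len_block = 0, ZeroDivisionError);
-- both A and B raise exactly there.
def Pre_get_decrypt_block (text : String) (n : Int) : Prop := 2 ≤ n
instance (text : String) (n : Int) : Decidable (Pre_get_decrypt_block text n) := by
  unfold Pre_get_decrypt_block; infer_instance

def pvWitness_get_decrypt_block : String × Int := ("Hi", 10)

def Spec_get_decrypt_block (text : String) (n : Int) (out : List Int) : Prop :=
  out = get_decrypt_block_alt text n
instance (text : String) (n : Int) (out : List Int) : Decidable (Spec_get_decrypt_block text n out) := by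
  unfold Spec_get_decrypt_block; infer_instance

-- ===== CLAIM (what is proved, stated in full; the proofs are below) =====
def Claim_equal_get_decrypt_block : Prop := ∀ (text : String) (n : Int),
  Dom_get_decrypt_block text n → Pre_get_decrypt_block text n →
  Spec_get_decrypt_block text n (get_decrypt_block text n)

-- ===== LEMMAS AND PROOFS =====

theorem pvBin_length (k v : Nat) : (pvBin k v).length = k := by
  induction k generalizing v with
  | zero => rfl
  | succ k ih => simp [pvBin, ih]

theorem pvBin_congr (k : Nat) {v w : Nat} (h : v % 2^k = w % 2^k) : pvBin k v = pvBin k w := by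
  induction k generalizing v w with
  | zero => rfl
  | succ k ih =>
    have h1 : v / 2^k % 2 = w / 2^k % 2 := by
      have hv : v % 2^(k+1) / 2^k = v / 2^k % 2 := by
        rw [pow_succ]; exact Nat.mod_mul_right_div_self v (2^k) 2
      have hw : w % 2^(k+1) / 2^k = w / 2^k % 2 := by
        rw [pow_succ]; exact Nat.mod_mul_right_div_self w (2^k) 2
      rw [← hv, ← hw, h]
    have h2 : v % 2^k = w % 2^k := by
      have hv := Nat.mod_mod_of_dvd v (pow_dvd_pow 2 (Nat.le_succ k))
      have hw := Nat.mod_mod_of_dvd w (pow_dvd_pow 2 (Nat.le_succ k))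
      rw [← hv, ← hw, h]
    simp [pvBin, h1, ih h2]

theorem pvBin_add (a b v : Nat) : pvBin (a + b) v = pvBin a (v / 2^b) ++ pvBin b v := by
  induction a generalizing v with
  | zero => simp [pvBin]
  | succ a ih =>
    have hbit : v / 2^(a+b) = v / 2^b / 2^a := by
      rw [Nat.div_div_eq_div_mul, ← pow_add, Nat.add_comm b a]
    have : a + 1 + b = (a + b) + 1 := by omega
    rw [this]
    simp only [pvBin, ih, hbit, List.cons_append]

theorem pvBin_zero (p : Nat) : pvBin p 0 = List.replicate p '0' := by
  induction p with
  | zero => rfl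
  | succ p ih => simp [pvBin, ih, List.replicate_succ]

theorem pvParseBin_from (k v : Nat) (a : Int) :
    (pvBin k v).foldl (fun acc c => acc * 2 + (if c = '1' then 1 else 0)) a
      = a * 2^k + ((v % 2^k : Nat) : Int) := by
  induction k generalizing v a with
  | zero => simp [pvBin]
  | succ k ih =>
    have hm : v % 2^(k+1) = (v / 2^k % 2) * 2^k + v % 2^k := by
      have h1 : v % 2^(k+1) / 2^k = v / 2^k % 2 := by
        rw [pow_succ]; exact Nat.mod_mul_right_div_self v (2^k) 2
      have h2 : v % 2^(k+1) % 2^k = v % 2^k :=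
        Nat.mod_mod_of_dvd v (pow_dvd_pow 2 (Nat.le_succ k))
      have h3 := Nat.div_add_mod (v % 2^(k+1)) (2^k)
      rw [h1, h2] at h3
      rw [← h3]; ring
    rcases Nat.mod_two_eq_zero_or_one (v / 2^k) with hb | hb
    · have hch : (if v / 2^k % 2 = 1 then '1' else '0') = '0' := by rw [hb]; simp
      simp only [pvBin, hch, List.foldl_cons]
      rw [ih, hm, hb]
      push_cast
      norm_num
      ring
    · have hch : (if v / 2^k % 2 = 1 then '1' else '0') = '1' := by rw [hb]; simp
      simp only [pvBin, hch, List.foldl_cons]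
      rw [ih, hm, hb]
      push_cast
      norm_num
      ring

theorem pvParseBin_pvBin (k v : Nat) : pvParseBin (pvBin k v) = ((v % 2^k : Nat) : Int) := by
  unfold pvParseBin
  rw [pvParseBin_from]; simp

-- bit-string accumulation = binary digits of the base-256 value
theorem bits_foldl (cs : List Char) (k v : Nat) (hv : v < 2^(8*k))
    (hc : ∀ c ∈ cs, c.toNat < 256) :
    cs.foldl (fun acc sym => acc ++ pvBin 8 sym.toNat) (pvBin (8*k) v)
      = pvBin (8*(k + cs.length)) (cs.foldl (fun x c => x*256 + c.toNat) v)
    ∧ cs.foldl (fun x c => x*256 + c.toNat) v < 2^(8*(k + cs.length)) := by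
  induction cs generalizing k v with
  | nil => refine ⟨by simp, by simpa using hv⟩
  | cons c cs ih =>
    have hc0 : c.toNat < 256 := hc c (List.mem_cons_self ..)
    have hstep : pvBin (8*k) v ++ pvBin 8 c.toNat = pvBin (8*(k+1)) (v*256 + c.toNat) := by
      have h1 : 8*(k+1) = 8*k + 8 := by ring
      rw [h1, pvBin_add]
      have hdiv : (v*256 + c.toNat) / 2^8 = v := by
        have h256 : (2:Nat)^8 = 256 := by norm_num
        rw [h256]; omega
      have hmod : pvBin 8 (v*256 + c.toNat) = pvBin 8 c.toNat := by
        apply pvBin_congr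
        have h256 : (2:Nat)^8 = 256 := by norm_num
        rw [h256]; omega
      rw [hdiv, hmod]
    have hv' : v*256 + c.toNat < 2^(8*(k+1)) := by
      have h1 : 8*(k+1) = 8*k + 8 := by ring
      rw [h1, pow_add]
      have : (2:Nat)^8 = 256 := by norm_num
      rw [this]
      nlinarith
    have := ih (k+1) (v*256 + c.toNat) hv' (fun d hd => hc d (List.mem_cons_of_mem _ hd))
    simp only [List.foldl_cons, hstep]
    have harr : k + 1 + cs.length = k + (c :: cs).length := by simp; omega
    rw [harr] at this
    exact this

-- the foldl-append loop is a map over the range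
theorem foldl_append_range {α : Type} (f : Nat → α) (k : Nat) (acc : List α) :
    (List.range k).foldl (fun bl i => bl ++ [f i]) acc = acc ++ (List.range k).map f := by
  induction k generalizing acc with
  | zero => simp
  | succ k ih => rw [List.range_succ]; simp [ih]

theorem reverse_map_range {α : Type} (g : Nat → α) (m : Nat) :
    ((List.range m).map (fun i => g (m - 1 - i))).reverse = (List.range m).map g := by
  apply List.ext_getElem
  · simp
  · intro j h1 h2
    simp only [List.length_reverse, List.length_map, List.length_range] at h1 h2
    rw [List.getElem_reverse, List.getElem_map, List.getElem_map, List.getElem_range,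
        List.getElem_range]
    · congr 1
      simp only [List.length_map, List.length_range]
      omega

-- the chunk [lb*i, lb*(i+1)) of the padded bit string is the binary string of digit m-1-i
theorem chunk_eq (lb m V i : Nat) (hi : i < m) :
    ((pvBin (m*lb) V).drop (lb*i)).take lb = pvBin lb (V / 2^(lb*(m-1-i))) := by
  have hsplit : m*lb = lb*i + (lb + lb*(m-1-i)) := by
    obtain ⟨j, hj⟩ : ∃ j, m = i + 1 + j := ⟨m - 1 - i, by omega⟩
    subst hj
    have h : i + 1 + j - 1 - i = j := by omega
    rw [h]; ring
  rw [hsplit, pvBin_add, List.drop_left' (pvBin_length (lb*i) _), pvBin_add,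
      List.take_left' (pvBin_length lb _)]

-- B's base-case loop invariant
theorem b_loop (lb v : Nat) (m : Nat) :
    (List.range m).foldl
      (fun (s : Nat × List Int) _ =>
        (s.1 >>> lb, s.2 ++ [((s.1 &&& (2^lb - 1) : Nat) : Int)])) (v, [])
      = (v / 2^(lb*m),
         (List.range m).map (fun j => ((v / 2^(lb*j) % 2^lb : Nat) : Int))) := by
  induction m with
  | zero => simp
  | succ m ih =>
    rw [List.range_succ, List.foldl_append, ih]
    simp only [List.foldl_cons, List.foldl_nil, List.map_append, List.map_cons, List.map_nil]
    rw [Nat.shiftRight_eq_div_pow, Nat.and_two_pow_sub_one_eq_mod]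
    have h1 : v / 2^(lb*m) / 2^lb = v / 2^(lb*(m+1)) := by
      rw [Nat.div_div_eq_div_mul, ← pow_add]
      have h : lb*m + lb = lb*(m+1) := by ring
      rw [h]
    rw [h1]

theorem div_mod_mod (v A B C : Nat) (h : B + C ≤ A) :
    (v % 2^A) / 2^B % 2^C = v / 2^B % 2^C := by
  have h1 : (2:Nat)^A = 2^B * 2^(A - B) := by rw [← pow_add]; congr 1; omega
  rw [h1, Nat.mod_mul_right_div_self, Nat.mod_mod_of_dvd _ (pow_dvd_pow 2 (by omega))]

-- pvDigits computes the base-2^lb digits, least significant first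
theorem pvDigits_eq (lb : Nat) (m : Nat) : ∀ v, pvDigits lb v m
    = (List.range m).map (fun j => ((v / 2^(lb*j) % 2^lb : Nat) : Int)) := by
  induction m using Nat.strong_induction_on with
  | _ m ih =>
    intro v
    rw [pvDigits]
    by_cases h : 32 < m
    · simp only [h, dif_pos]
      rw [ih (m/2) (by omega), ih (m - m/2) (by omega)]
      have hsplit : m = m/2 + (m - m/2) := by omega
      conv_rhs => rw [hsplit, List.range_add]
      rw [List.map_append, List.map_map]
      congr 1
      · apply List.map_congr_left
        intro j hj
        rw [List.mem_range] at hj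
        have hle : lb*j + lb ≤ lb*(m/2) := by
          have h1 : lb*(j+1) ≤ lb*(m/2) := Nat.mul_le_mul_left lb (by omega)
          have h2 : lb*(j+1) = lb*j + lb := by ring
          omega
        congr 1
        rw [Nat.and_two_pow_sub_one_eq_mod]
        exact div_mod_mod v (lb*(m/2)) (lb*j) lb hle
      · apply List.map_congr_left
        intro j hj
        simp only [Function.comp_apply]
        congr 2
        rw [Nat.shiftRight_eq_div_pow, Nat.div_div_eq_div_mul, ← pow_add]
        congr 2
        rw [Nat.mul_add]
    · simp only [h, dif_neg, not_false_eq_true]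
      rw [b_loop]

-- arithmetic: the padded length-- arithmetic: the padded length is m*lb with m = ceil(8L/lb)
theorem pad_arith (L lb : Nat) (hlb : 1 ≤ lb) :
    (if 8*L % lb ≠ 0 then (lb - 8*L % lb) + 8*L else 8*L)
      = ((8*L + lb - 1) / lb) * lb := by
  set r := 8*L % lb with hr
  have hmod := Nat.div_add_mod (8*L) lb
  by_cases h : r = 0
  · simp only [h, ne_eq, not_true_eq_false, if_neg, not_false_eq_true]
    have h1 : 8*L + lb - 1 = lb * (8*L/lb) + (lb - 1) := by omega
    have h3 : (lb - 1) / lb = 0 := Nat.div_eq_of_lt (by omega)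
    rw [h1, Nat.mul_add_div (by omega), h3, Nat.add_zero]
    exact (Nat.div_mul_cancel (Nat.dvd_of_mod_eq_zero (hr ▸ h))).symm
  · have hrlt : r < lb := Nat.mod_lt _ (by omega)
    simp only [ne_eq, h, not_false_eq_true, if_pos]
    have h1 : 8*L + lb - 1 = lb * (8*L/lb) + (r + lb - 1) := by omega
    have h2 : (r + lb - 1) / lb = 1 := by
      have he : r + lb - 1 = (r - 1) + lb := by omega
      rw [he, Nat.add_div_right _ (by omega), Nat.div_eq_of_lt (by omega)]
    rw [h1, Nat.mul_add_div (by omega), h2, Nat.add_mul, one_mul, Nat.mul_comm (8*L/lb) lb]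
    omega

theorem pad_eq (L lb V : Nat) (hlb : 1 ≤ lb) (hV : V < 2^(8*L)) :
    (if 8*L % lb ≠ 0 then List.replicate (lb - 8*L % lb) '0' ++ pvBin (8*L) V
      else pvBin (8*L) V)
      = pvBin (((8*L + lb - 1) / lb) * lb) V := by
  have harith := pad_arith L lb hlb
  by_cases h : 8*L % lb = 0
  · simp only [h, ne_eq, not_true_eq_false, if_false] at harith ⊢
    rw [← harith]
  · simp only [ne_eq, h, not_false_eq_true, if_pos] at harith ⊢
    rw [← harith, ← pvBin_zero,
        show (0:Nat) = V / 2^(8*L) from (Nat.div_eq_of_lt hV).symm, ← pvBin_add]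

theorem get_decrypt_block_spec : Claim_equal_get_decrypt_block := by
  intro text n hdom hpre
  unfold Pre_get_decrypt_block at hpre
  unfold Spec_get_decrypt_block
  have hc : ∀ c ∈ text.toList, c.toNat < 256 := by
    have hd : pvDomStr text = true := by
      unfold Dom_get_decrypt_block at hdom
      exact (Bool.and_eq_true _ _).mp hdom |>.1
    unfold pvDomStr at hd
    rw [List.all_eq_true] at hd
    intro c hcm
    have h2 := hd c hcm
    unfold pvDomChar at h2
    simp at h2
    omega
  set cs := text.toList with hcs
  set lb := Nat.log 2 n.toNat with hlbdef
  have hlb : 1 ≤ lb := Nat.log_pos (by norm_num) (by omega)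
  set V := cs.foldl (fun x c => x*256 + c.toNat) 0 with hVdef
  have hbits := bits_foldl cs 0 0 (by simp) hc
  simp only [Nat.mul_zero, Nat.zero_add, show pvBin 0 0 = [] from rfl] at hbits
  obtain ⟨hbs, hVlt⟩ := hbits
  rw [← hVdef] at hbs hVlt
  set L := cs.length with hL
  set m := (8*L + lb - 1) / lb with hm
  have hLs : text.length = L := String.length_toList.symm
  -- A's value
  have hA : get_decrypt_block text n
      = (List.range m).map (fun j => ((V / 2^(lb*j) % 2^lb : Nat) : Int)) := by
    simp only [get_decrypt_block, ← hcs, ← hlbdef, hbs, pvBin_length]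
    rw [pad_eq L lb V hlb hVlt]
    simp only [pvBin_length, Nat.mul_div_cancel _ (by omega : 0 < lb), ← hm]
    rw [foldl_append_range, List.nil_append]
    rw [show (List.range m).map (fun j => ((V / 2^(lb*j) % 2^lb : Nat) : Int))
          = ((List.range m).map (fun i => ((V / 2^(lb*(m-1-i)) % 2^lb : Nat) : Int))).reverse
        from (reverse_map_range _ m).symm]
    congr 1
    apply List.map_congr_left
    intro i hi
    rw [List.mem_range] at hi
    rw [PySem.List.slice_natCast, show lb*(i+1) - lb*i = lb by rw [Nat.mul_succ]; omega,
        chunk_eq lb m V i hi, pvParseBin_pvBin]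
  -- B's value
  have hB : get_decrypt_block_alt text n
      = (List.range m).map (fun j => ((V / 2^(lb*j) % 2^lb : Nat) : Int)) := by
    simp only [get_decrypt_block_alt, ← hcs, ← hlbdef, hLs, ← hVdef, ← hm]
    exact pvDigits_eq lb m V
  rw [hA, hB]
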